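-- pv_equiv track=rewrite | github.com/BruceHi/leetcode | month8-21/pondSizes.py | pondSizes
-- ===== SOURCE A (Python) =====
-- from typing import List
--
-- def pondSizes(land: List[List[int]]) -> List[int]:
--     m, n = len(land), len(land[0])
--
--     def dfs(i, j):
--         land[i][j] = 1
--         res = 1
--         for dx in [0, -1, 1]:
--             for dy in [0, -1, 1]:
--                 x, y = i + dx, j + dy
--                 if 0 <= x < m and 0 <= y < n and land[x][y] == 0:
--                     res += dfs(x, y)
--         return res
--
--     ans = []
--     for i in range(m):
--         for j in range(n):
--             if land[i][j] == 0:
--                 ans.append(dfs(i, j))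
--     return sorted(ans)
-- ===== SOURCE B (Python) =====
-- from typing import List
--
-- def pondSizes(land: List[List[int]]) -> List[int]:
--     m, n = len(land), len(land[0])
--     zeros = {(i, j) for i in range(m) for j in range(n) if land[i][j] == 0}
--     ans = []
--     for seed in ((i, j) for i in range(m) for j in range(n)):
--         if seed in zeros:
--             stack = [seed]
--             size = 0
--             while stack:
--                 p = stack.pop()
--                 if p in zeros:
--                     zeros.discard(p)
--                     size += 1
--                     x, y = p
--                     stack += [(x + 1, y + 1), (x + 1, y - 1), (x + 1, y),
--                               (x - 1, y + 1), (x - 1, y - 1), (x - 1, y),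
--                               (x, y + 1), (x, y - 1)]
--             ans.append(size)
--     return sorted(ans)
-- ===== Notes on version B (the rewrite author's own statement) =====
-- stated objective: alternative
-- what changed: replaces A's recursive grid-marking DFS with a different data structure and control flow: a set of the zero-cell coordinates is built once, the scan runs over one flattened seed list, and each pond is counted by an explicit-stack flood fill that marks cells by removing them from the set (the grid is never written)
import Mathlib
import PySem

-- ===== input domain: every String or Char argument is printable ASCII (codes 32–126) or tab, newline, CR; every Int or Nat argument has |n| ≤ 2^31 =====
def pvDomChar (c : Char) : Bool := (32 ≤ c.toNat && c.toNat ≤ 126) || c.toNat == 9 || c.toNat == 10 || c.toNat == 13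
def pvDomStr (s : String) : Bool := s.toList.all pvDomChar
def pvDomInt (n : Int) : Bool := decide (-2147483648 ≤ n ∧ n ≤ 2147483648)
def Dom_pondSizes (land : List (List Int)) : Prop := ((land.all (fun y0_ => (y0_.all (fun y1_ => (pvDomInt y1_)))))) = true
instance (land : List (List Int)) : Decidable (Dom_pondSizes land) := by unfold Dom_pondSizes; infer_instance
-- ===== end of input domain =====

-- B tracks the unvisited zero cells in a SET built once from the grid and flood-fills with an
-- explicit stack (mark = remove from the set), instead of A's recursive DFS that marks the grid;
-- A mutates the Python grid in place, B does not — the claim is about the return value.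

-- ===== PORT A =====
-- land[x][y] read / land[x][y] = 1 write (indices are in range whenever used under Pre_)
def getCell (g : List (List Int)) (x y : Nat) : Int := (g.getD x []).getD y 0
def setCell (g : List (List Int)) (x y : Nat) : List (List Int) := g.set x ((g.getD x []).set y 1)
-- number of zero cells; used only as fuel (an upper bound on how many cells a traversal can mark)
def nzRow (r : List Int) : Nat := r.countP (fun a => a == 0)
def nzG (g : List (List Int)) : Nat := (g.map nzRow).sum
-- the guard '0 <= x < m and 0 <= y < n and land[x][y] == 0'
def gOK (g : List (List Int)) (m n : Nat) (x y : Int) : Bool :=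
  decide (0 ≤ x) && decide (x < (m : Int)) && decide (0 ≤ y) && decide (y < (n : Int)) &&
    (getCell g x.toNat y.toNat == 0)

-- offsets in A's order: dx in [0,-1,1], dy in [0,-1,1]
def OFFS_A : List (Int × Int) :=
  [(0,0),(0,-1),(0,1),(-1,0),(-1,-1),(-1,1),(1,0),(1,-1),(1,1)]

mutual
-- def dfs(i, j): land[i][j] = 1; res = 1; for (dx,dy) in offsets: … ; return res
-- (fuel decreases by one per marked cell; nzG land is always enough — proved below)
def dfsA (f : Nat) (g : List (List Int)) (i j m n : Nat) : Int × List (List Int) :=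
  match f with
  | 0 => (0, g)
  | Nat.succ f' => dfsLoopA f' OFFS_A (setCell g i j) i j m n 1
termination_by (f, 0)
-- the double for-loop over (dx, dy), threading the mutated grid and accumulating res
def dfsLoopA (f : Nat) (offs : List (Int × Int)) (g : List (List Int)) (i j m n : Nat)
    (res : Int) : Int × List (List Int) :=
  match offs with
  | [] => (res, g)
  | d :: rest =>
    let x : Int := (i : Int) + d.1
    let y : Int := (j : Int) + d.2
    if gOK g m n x y then
      let p := dfsA f g x.toNat y.toNat m n
      dfsLoopA f rest p.2 i j m n (res + p.1)
    else
      dfsLoopA f rest g i j m n res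
termination_by (f, offs.length + 1)
end

-- for j in range(n): if land[i][j] == 0: ans.append(dfs(i, j))
def scanColsA (f : Nat) (g : List (List Int)) (i : Nat) (js : List Nat) (m n : Nat)
    (ans : List Int) : List Int × List (List Int) :=
  match js with
  | [] => (ans, g)
  | j :: rest =>
    if getCell g i j == 0 then
      let p := dfsA f g i j m n
      scanColsA f p.2 i rest m n (ans ++ [p.1])
    else scanColsA f g i rest m n ans

-- for i in range(m): …
def scanRowsA (f : Nat) (g : List (List Int)) (is : List Nat) (m n : Nat)
    (ans : List Int) : List Int × List (List Int) :=
  match is with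
  | [] => (ans, g)
  | i :: rest =>
    let p := scanColsA f g i (List.range n) m n ans
    scanRowsA f p.2 rest m n p.1

def pondSizes (land : List (List Int)) : List Int :=
  let m := land.length
  let n := (land.headD []).length
  let p := scanRowsA (nzG land) land (List.range m) m n []
  PySem.List.sorted p.1 (fun v => v) false

-- ===== PORT B =====
-- zeros = {(i, j) for i in range(m) for j in range(n) if land[i][j] == 0}
-- (the inner comprehension of one row, then the flattened double comprehension, fed to set())
def ZRow (g : List (List Int)) (n i : Nat) : List (Int × Int) :=
  (List.range n).filterMap (fun j =>
    if (g.getD i []).getD j 0 == 0 then some (((i : Nat) : Int), ((j : Nat) : Int)) else none)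
def ZOf (g : List (List Int)) (m n : Nat) : List (Int × Int) :=
  (List.range m).flatMap (fun i => ZRow g n i)

-- the eight neighbours pushed on the stack, in the order Source B lists them
def NB (p : Int × Int) : List (Int × Int) :=
  [(p.1 + 1, p.2 + 1), (p.1 + 1, p.2 - 1), (p.1 + 1, p.2),
   (p.1 - 1, p.2 + 1), (p.1 - 1, p.2 - 1), (p.1 - 1, p.2),
   (p.1, p.2 + 1), (p.1, p.2 - 1)]

-- while stack: p = stack.pop(); if p in zeros: zeros.discard(p); size += 1; stack += NB(p)
-- Python pops from the END of the list; the Lean stack keeps the top at the HEAD, so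
-- 'stack += NB(p)' is '(NB p).reverse ++ rest'.
-- (fuel decreases by one per removed cell; nzG land is always enough — proved below)
def fillS (f : Nat) (Z : PySem.Set (Int × Int)) (st : List (Int × Int)) (size : Int) :
    Int × PySem.Set (Int × Int) :=
  match st with
  | [] => (size, Z)
  | p :: rest =>
    if PySem.Set.contains Z p then
      match f with
      | 0 => (size, Z)
      | Nat.succ f' => fillS f' (PySem.Set.discard Z p) ((NB p).reverse ++ rest) (size + 1)
    else fillS f Z rest size
termination_by (f, st.length)

-- for seed in ((i, j) for i in range(m) for j in range(n)): if seed in zeros: … ans.append(size)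
def scanS (f : Nat) (Z : PySem.Set (Int × Int)) (seeds : List (Int × Int)) (ans : List Int) :
    List Int × PySem.Set (Int × Int) :=
  match seeds with
  | [] => (ans, Z)
  | s :: rest =>
    if PySem.Set.contains Z s then
      let p := fillS f Z [s] 0
      scanS f p.2 rest (ans ++ [p.1])
    else scanS f Z rest ans

def pondSizes_alt (land : List (List Int)) : List Int :=
  let m := land.length
  let n := (land.headD []).length
  let seeds := (List.range m).flatMap (fun (i : Nat) => (List.range n).map (fun (j : Nat) => ((i : Int), (j : Int))))
  let p := scanS (nzG land) (PySem.Set.ofList (ZOf land m n)) seeds []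
  PySem.List.sorted p.1 (fun v => v) false

-- ===== PRECONDITION & SPEC =====
-- Pre_ excludes exactly the inputs where Python A raises IndexError: the empty grid
-- (len(land[0])) and grids having a row shorter than row 0 (land[x][y] with y < n).
def Pre_pondSizes (land : List (List Int)) : Prop :=
  land ≠ [] ∧ ∀ r ∈ land, (land.headD []).length ≤ r.length
instance (land : List (List Int)) : Decidable (Pre_pondSizes land) := by
  unfold Pre_pondSizes; infer_instance

def pvWitness_pondSizes : List (List Int) := [[0, 0, 1], [1, 0, 1], [0, 1, 0]]

def Spec_pondSizes (land : List (List Int)) (out : List Int) : Prop := out = pondSizes_alt land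
instance (land : List (List Int)) (out : List Int) : Decidable (Spec_pondSizes land out) := by
  unfold Spec_pondSizes; infer_instance

-- ===== CLAIM (what is proved, stated in full; the proofs are below) =====
def Claim_equal_pondSizes : Prop :=
  ∀ (land : List (List Int)), Dom_pondSizes land → Pre_pondSizes land →
    Spec_pondSizes land (pondSizes land)

-- ===== LEMMAS AND PROOFS =====

def Valid (g : List (List Int)) (m n : Nat) : Prop :=
  g.length = m ∧ ∀ r ∈ g, n ≤ r.length

theorem valid_setCell {g : List (List Int)} {m n x y : Nat} (h : Valid g m n) :
    Valid (setCell g x y) m n := by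
  obtain ⟨hl, hr⟩ := h
  by_cases hx : x < g.length
  · refine ⟨by simp [setCell, hl], ?_⟩
    intro r hrm
    rcases List.mem_or_eq_of_mem_set hrm with h' | h'
    · exact hr r h'
    · subst h'
      have : g.getD x [] ∈ g := by
        rw [List.getD_eq_getElem _ _ hx]; exact List.getElem_mem hx
      simpa using hr _ this
  · rw [setCell, List.set_eq_of_length_le (by omega)]
    exact ⟨hl, hr⟩

theorem getCell_setCell_self {g : List (List Int)} {x y : Nat}
    (hx : x < g.length) (hy : y < (g.getD x []).length) :
    getCell (setCell g x y) x y = 1 := by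
  have hy' : y < ((g.getD x []).set y 1).length := by simpa using hy
  have h1 : (g.set x ((g.getD x []).set y 1)).getD x [] = (g.getD x []).set y 1 := by
    rw [List.getD_eq_getElem _ _ (by simpa using hx), List.getElem_set_self]
  rw [getCell, setCell, h1, List.getD_eq_getElem _ _ hy', List.getElem_set_self]

theorem nzRow_set {r : List Int} {y : Nat} (hy : y < r.length) (h0 : r.getD y 0 = 0) :
    nzRow (r.set y 1) + 1 = nzRow r := by
  induction r generalizing y with
  | nil => simp at hy
  | cons a t ih =>
    cases y with
    | zero => simp_all [nzRow]
    | succ y =>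
      show nzRow (a :: t.set y 1) + 1 = nzRow (a :: t)
      simp only [nzRow, List.countP_cons]
      have := ih (y := y) (by simpa using hy) (by simpa using h0)
      simp only [nzRow] at this
      omega

theorem nzRow_set_le (r : List Int) (y : Nat) : nzRow (r.set y 1) ≤ nzRow r := by
  induction r generalizing y with
  | nil => simp
  | cons a t ih =>
    cases y with
    | zero => simp [nzRow, List.countP_cons]
    | succ y =>
      show nzRow (a :: t.set y 1) ≤ nzRow (a :: t)
      simp only [nzRow, List.countP_cons]
      have := ih y
      simp only [nzRow] at this
      omega

theorem nzG_set_row {g : List (List Int)} {x : Nat} (r' : List Int) (hx : x < g.length) :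
    nzG (g.set x r') + nzRow (g.getD x []) = nzG g + nzRow r' := by
  induction g generalizing x with
  | nil => simp at hx
  | cons a t ih =>
    cases x with
    | zero => simp [nzG]; omega
    | succ x =>
      show nzG (a :: t.set x r') + nzRow (t.getD x []) = _
      simp only [nzG, List.map_cons, List.sum_cons] at *
      have := ih (x := x) (by simpa using hx)
      omega

theorem nz_setCell {g : List (List Int)} {x y : Nat}
    (hx : x < g.length) (hy : y < (g.getD x []).length)
    (h0 : getCell g x y = 0) : nzG (setCell g x y) + 1 = nzG g := by
  have h1 := nzG_set_row ((g.getD x []).set y 1) hx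
  have h2 := nzRow_set hy h0
  unfold setCell
  omega

theorem nz_setCell_le (g : List (List Int)) (x y : Nat) :
    nzG (setCell g x y) ≤ nzG g := by
  by_cases hx : x < g.length
  · have h1 := nzG_set_row ((g.getD x []).set y 1) hx
    have h2 := nzRow_set_le (g.getD x []) y
    unfold setCell; omega
  · rw [setCell, List.set_eq_of_length_le (by omega)]

theorem nz_pos {g : List (List Int)} {x y : Nat}
    (hx : x < g.length) (hy : y < (g.getD x []).length)
    (h0 : getCell g x y = 0) : 1 ≤ nzG g := by
  have hmem : (g.getD x []).getD y 0 ∈ g.getD x [] := by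
    rw [List.getD_eq_getElem _ _ hy]; exact List.getElem_mem hy
  have h1 : 0 < nzRow (g.getD x []) := by
    rw [nzRow, List.countP_pos_iff]
    exact ⟨_, hmem, by simp [getCell] at h0; simp [h0]⟩
  have hgm : g.getD x [] ∈ g := by
    rw [List.getD_eq_getElem _ _ hx]; exact List.getElem_mem hx
  have : nzRow (g.getD x []) ∈ g.map nzRow := List.mem_map_of_mem hgm
  have := List.le_sum_of_mem this
  unfold nzG
  omega

theorem gOK_elim {g : List (List Int)} {m n : Nat} {x y : Int}
    (hV : Valid g m n) (h : gOK g m n x y = true) :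
    0 ≤ x ∧ 0 ≤ y ∧ x.toNat < g.length ∧ y.toNat < (g.getD x.toNat []).length ∧
      getCell g x.toNat y.toNat = 0 := by
  simp only [gOK, Bool.and_eq_true, decide_eq_true_eq, beq_iff_eq] at h
  obtain ⟨⟨⟨⟨hx0, hxm⟩, hy0⟩, hyn⟩, h0⟩ := h
  obtain ⟨hl, hr⟩ := hV
  have hxl : x.toNat < g.length := by omega
  have hrow : g.getD x.toNat [] ∈ g := by
    rw [List.getD_eq_getElem _ _ hxl]; exact List.getElem_mem hxl
  have := hr _ hrow
  exact ⟨hx0, hy0, hxl, by omega, h0⟩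

theorem dfsA_mono (f : Nat) :
    (∀ g i j m n, Valid g m n →
        Valid (dfsA f g i j m n).2 m n ∧ nzG (dfsA f g i j m n).2 ≤ nzG g) ∧
    (∀ offs g i j m n res, Valid g m n →
        Valid (dfsLoopA f offs g i j m n res).2 m n ∧
          nzG (dfsLoopA f offs g i j m n res).2 ≤ nzG g) := by
  induction f with
  | zero =>
    have hP : ∀ g i j m n, Valid g m n →
        Valid (dfsA 0 g i j m n).2 m n ∧ nzG (dfsA 0 g i j m n).2 ≤ nzG g := by
      intro g i j m n hV; simp only [dfsA]; exact ⟨hV, le_rfl⟩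
    refine ⟨hP, ?_⟩
    intro offs
    induction offs with
    | nil => intro g i j m n res hV; simp only [dfsLoopA]; exact ⟨hV, le_rfl⟩
    | cons d rest ih =>
      intro g i j m n res hV
      rw [dfsLoopA]
      by_cases hg : gOK g m n ((i : Int) + d.1) ((j : Int) + d.2)
      · simp only [hg, if_true]
        have h1 := hP g ((i : Int) + d.1).toNat ((j : Int) + d.2).toNat m n hV
        have h2 := ih (dfsA 0 g ((i : Int) + d.1).toNat ((j : Int) + d.2).toNat m n).2 i j m n
          (res + (dfsA 0 g ((i : Int) + d.1).toNat ((j : Int) + d.2).toNat m n).1) h1.1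
        exact ⟨h2.1, le_trans h2.2 h1.2⟩
      · simp only [hg, Bool.false_eq_true, if_false]
        exact ih g i j m n res hV
  | succ f ihf =>
    have hP : ∀ g i j m n, Valid g m n →
        Valid (dfsA (f+1) g i j m n).2 m n ∧ nzG (dfsA (f+1) g i j m n).2 ≤ nzG g := by
      intro g i j m n hV
      rw [dfsA]
      have h1 := ihf.2 OFFS_A (setCell g i j) i j m n 1 (valid_setCell hV)
      exact ⟨h1.1, le_trans h1.2 (nz_setCell_le g i j)⟩
    refine ⟨hP, ?_⟩
    intro offs
    induction offs with
    | nil => intro g i j m n res hV; simp only [dfsLoopA]; exact ⟨hV, le_rfl⟩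
    | cons d rest ih =>
      intro g i j m n res hV
      rw [dfsLoopA]
      by_cases hg : gOK g m n ((i : Int) + d.1) ((j : Int) + d.2)
      · simp only [hg, if_true]
        have h1 := hP g ((i : Int) + d.1).toNat ((j : Int) + d.2).toNat m n hV
        have h2 := ih (dfsA (f+1) g ((i : Int) + d.1).toNat ((j : Int) + d.2).toNat m n).2 i j m n
          (res + (dfsA (f+1) g ((i : Int) + d.1).toNat ((j : Int) + d.2).toNat m n).1) h1.1
        exact ⟨h2.1, le_trans h2.2 h1.2⟩
      · simp only [hg, Bool.false_eq_true, if_false]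
        exact ih g i j m n res hV

-- ===== B-side bridge: the set of unvisited zero cells IS the grid's zero positions =====

theorem mem_ZRow {g : List (List Int)} {n i : Nat} {p : Int × Int} :
    p ∈ ZRow g n i ↔ ∃ j : Nat, j < n ∧ p = ((i : Int), (j : Int)) ∧
      (g.getD i []).getD j 0 = 0 := by
  constructor
  · intro h
    rw [ZRow, List.mem_filterMap] at h
    obtain ⟨j, hj, hsome⟩ := h
    rw [List.mem_range] at hj
    by_cases h0 : (g.getD i []).getD j 0 == 0
    · rw [if_pos h0] at hsome
      exact ⟨j, hj, (Option.some_inj.mp hsome).symm, by simpa using h0⟩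
    · rw [if_neg h0] at hsome; cases hsome
  · rintro ⟨j, hj, rfl, h0⟩
    rw [ZRow, List.mem_filterMap]
    exact ⟨j, List.mem_range.mpr hj, by rw [if_pos (by rw [h0]; rfl)]⟩

theorem mem_ZOf {g : List (List Int)} {m n : Nat} {p : Int × Int} :
    p ∈ ZOf g m n ↔ gOK g m n p.1 p.2 = true := by
  rw [ZOf, List.mem_flatMap]
  constructor
  · rintro ⟨i, hi, hp⟩
    rw [List.mem_range] at hi
    obtain ⟨j, hj, rfl, h0⟩ := mem_ZRow.mp hp
    simp only [gOK, Bool.and_eq_true, decide_eq_true_eq, beq_iff_eq]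
    refine ⟨⟨⟨⟨by positivity, by exact_mod_cast hi⟩, by positivity⟩, by exact_mod_cast hj⟩, ?_⟩
    simpa [getCell] using h0
  · intro h
    simp only [gOK, Bool.and_eq_true, decide_eq_true_eq, beq_iff_eq] at h
    obtain ⟨⟨⟨⟨hx0, hxm⟩, hy0⟩, hyn⟩, h0⟩ := h
    refine ⟨p.1.toNat, List.mem_range.mpr (by omega), mem_ZRow.mpr ⟨p.2.toNat, by omega, ?_, ?_⟩⟩
    · ext <;> simp <;> omega
    · simpa [getCell] using h0

theorem contains_ZOf (g : List (List Int)) (m n : Nat) (p : Int × Int) :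
    PySem.Set.contains (ZOf g m n) p = gOK g m n p.1 p.2 := by
  by_cases h : gOK g m n p.1 p.2 = true
  · rw [h, (PySem.Set.contains_iff _ _).mpr (mem_ZOf.mpr h)]
  · rw [Bool.eq_false_iff.mpr h, ← Bool.not_eq_true, PySem.Set.contains_iff]
    rw [mem_ZOf]
    simpa using h

theorem fst_of_mem_ZRow {g : List (List Int)} {n i : Nat} {p : Int × Int}
    (h : p ∈ ZRow g n i) : p.1 = (i : Int) := by
  obtain ⟨j, _, rfl, _⟩ := mem_ZRow.mp h
  rfl

theorem nodup_ZOf (g : List (List Int)) (m n : Nat) : (ZOf g m n).Nodup := by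
  rw [ZOf, List.nodup_flatMap]
  constructor
  · intro i _
    apply List.Nodup.filterMap _ (List.nodup_range)
    intro a a' b h1 h2
    split_ifs at h1 h2 <;>
      simp only [Option.mem_def, Option.some.injEq, reduceCtorEq] at h1 h2
    have h4 : ((a : Int)) = ((a' : Int)) := congrArg Prod.snd (h1.trans h2.symm)
    omega
  · apply List.pairwise_lt_range.imp
    intro i i' hlt p hp hp'
    have h1 := fst_of_mem_ZRow hp
    have h2 := fst_of_mem_ZRow hp'
    rw [h1] at h2
    have : i = i' := by exact_mod_cast h2
    omega

-- removing the marked cell from the set is exactly marking it in the grid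
theorem ZOf_setCell {g : List (List Int)} {m n x y : Nat}
    (hx : x < g.length) (hyr : y < (g.getD x []).length) (hyn : y < n) :
    ZOf (setCell g x y) m n = PySem.Set.discard (ZOf g m n) ((x : Int), (y : Int)) := by
  have hdis : PySem.Set.discard (ZOf g m n) ((x : Int), (y : Int)) =
      (ZOf g m n).filter (fun q => !q == ((x : Int), (y : Int))) := rfl
  rw [hdis, ZOf, ZOf, List.filter_flatMap]
  apply List.flatMap_congr
  intro i _
  by_cases hix : i = x
  · subst hix
    have hrow : (setCell g i y).getD i [] = (g.getD i []).set y 1 := by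
      rw [setCell, List.getD_eq_getElem _ _ (by simpa using hx), List.getElem_set_self]
    rw [ZRow, ZRow, List.filter_filterMap]
    apply List.filterMap_congr
    intro j _
    rw [hrow]
    by_cases hjy : j = y
    · subst hjy
      have h1 : ((g.getD i []).set j 1).getD j 0 = 1 := by
        rw [List.getD_eq_getElem _ _ (by simpa using hyr), List.getElem_set_self]
      rw [h1]
      by_cases h0 : ((g.getD i []).getD j 0 == 0) = true
      · rw [if_pos h0, if_neg (by decide)]
        simp [Option.filter]
      · rw [if_neg h0, if_neg (by decide)]
        simp [Option.filter]
    · have h1 : ((g.getD i []).set y 1).getD j 0 = (g.getD i []).getD j 0 := by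
        have h2 := List.getElem?_set_ne (l := g.getD i []) (a := (1 : Int))
          (show y ≠ j by omega)
        simp only [List.getD_eq_getElem?_getD] at h2 ⊢
        rw [h2]
      rw [h1]
      by_cases h0 : ((g.getD i []).getD j 0 == 0) = true
      · rw [if_pos h0]
        have hne : (((i : Int), (j : Int)) == ((i : Int), (y : Int))) = false := by
          simp [Prod.ext_iff]; omega
        simp [Option.filter, hne]
      · rw [if_neg h0]
        simp [Option.filter]
  · have hrow : (setCell g x y).getD i [] = g.getD i [] := by
      simp [setCell, List.getD_eq_getElem?_getD,
        List.getElem?_set_ne (show x ≠ i by omega)]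
    have hz : ZRow (setCell g x y) n i = ZRow g n i := by
      rw [ZRow, ZRow, hrow]
    rw [hz, List.filter_eq_self.mpr]
    intro p hp
    have := fst_of_mem_ZRow hp
    have hne : p ≠ ((x : Int), (y : Int)) := by
      intro he
      rw [he] at this
      simp at this
      omega
    simpa using hne

theorem gOK_snd_lt {g : List (List Int)} {m n : Nat} {x y : Int}
    (h : gOK g m n x y = true) : y.toNat < n := by
  simp only [gOK, Bool.and_eq_true, decide_eq_true_eq] at h
  omega

-- fuel irrelevance for the stack fill, given enough fuel on both sides
theorem fillS_irr (N : Nat) :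
    ∀ g, nzG g ≤ N → ∀ m n, Valid g m n → ∀ st size f1 f2, nzG g ≤ f1 → nzG g ≤ f2 →
      fillS f1 (ZOf g m n) st size = fillS f2 (ZOf g m n) st size := by
  induction N with
  | zero =>
    intro g hN m n hV st
    induction st with
    | nil => intro size f1 f2 h1 h2; simp only [fillS]
    | cons c rest ih =>
      intro size f1 f2 h1 h2
      rw [fillS.eq_def, fillS.eq_def]; simp only []
      rw [contains_ZOf]
      by_cases hg : gOK g m n c.1 c.2 = true
      · obtain ⟨_, _, hxl, hyl, h0⟩ := gOK_elim hV hg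
        have := nz_pos hxl hyl h0; omega
      · simp only [hg, Bool.false_eq_true, if_false]
        exact ih size f1 f2 h1 h2
  | succ N ihN =>
    intro g hN m n hV st
    induction st with
    | nil => intro size f1 f2 h1 h2; simp only [fillS]
    | cons c rest ih =>
      intro size f1 f2 h1 h2
      rw [fillS.eq_def, fillS.eq_def]; simp only []
      rw [contains_ZOf]
      by_cases hg : gOK g m n c.1 c.2 = true
      · simp only [hg, if_true]
        obtain ⟨hx0, hy0, hxl, hyl, h0⟩ := gOK_elim hV hg
        have hpos := nz_pos hxl hyl h0
        obtain ⟨f1', rfl⟩ : ∃ k, f1 = k + 1 := ⟨f1 - 1, by omega⟩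
        obtain ⟨f2', rfl⟩ : ∃ k, f2 = k + 1 := ⟨f2 - 1, by omega⟩
        have hc : ((c.1.toNat : Int), (c.2.toNat : Int)) = c := by
          ext <;> simp <;> omega
        rw [← hc, ← ZOf_setCell hxl hyl (gOK_snd_lt hg)]
        have hset := nz_setCell hxl hyl h0
        exact ihN (setCell g c.1.toNat c.2.toNat) (by omega) m n (valid_setCell hV)
          _ (size + 1) f1' f2' (by omega) (by omega)
      · simp only [hg, Bool.false_eq_true, if_false]
        exact ih size f1 f2 h1 h2

def R8 : List (Int × Int) := [(0,-1),(0,1),(-1,0),(-1,-1),(-1,1),(1,0),(1,-1),(1,1)]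

theorem dfsA_unfold {g : List (List Int)} {xN yN : Nat} (f₀ m n : Nat)
    (hx : xN < g.length) (hy : yN < (g.getD xN []).length) :
    dfsA (f₀ + 1) g xN yN m n = dfsLoopA f₀ R8 (setCell g xN yN) xN yN m n 1 := by
  rw [dfsA]
  rw [show OFFS_A = ((0:Int),(0:Int)) :: R8 from rfl]
  rw [dfsLoopA]
  have h1 : getCell (setCell g xN yN) xN yN = 1 := getCell_setCell_self hx hy
  have hg0 : gOK (setCell g xN yN) m n ((xN : Int) + 0) ((yN : Int) + 0) = false := by
    simp [gOK, h1]
  simp only [hg0, Bool.false_eq_true, if_false]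

-- the stack fill on the zero-cell set simulates A's recursive DFS on the grid
theorem simS (N : Nat) :
    ∀ g, nzG g ≤ N → ∀ m n, Valid g m n → ∀ (ds : List (Int × Int)) (i j : Nat) st size res f fL f',
      nzG g ≤ f → nzG g ≤ fL → nzG (dfsLoopA f ds g i j m n res).2 ≤ f' →
      fillS fL (ZOf g m n) (ds.map (fun d => ((i : Int) + d.1, (j : Int) + d.2)) ++ st) size =
        fillS f' (ZOf (dfsLoopA f ds g i j m n res).2 m n) st
          (size + (dfsLoopA f ds g i j m n res).1 - res) := by
  induction N with
  | zero =>
    intro g hN m n hV ds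
    induction ds with
    | nil =>
      intro i j st size res f fL f' hf hfL hf'
      simp only [dfsLoopA, List.map_nil, List.nil_append] at *
      rw [show size + res - res = size by ring]
      exact fillS_irr 0 g hN m n hV st size fL f' hfL hf'
    | cons d rest ih =>
      intro i j st size res f fL f' hf hfL hf'
      by_cases hg : gOK g m n ((i : Int) + d.1) ((j : Int) + d.2)
      · obtain ⟨_, _, hx, hy, h0⟩ := gOK_elim hV hg
        have := nz_pos hx hy h0; omega
      · rw [dfsLoopA] at hf' ⊢
        simp only [hg, Bool.false_eq_true, if_false] at hf' ⊢
        simp only [List.map_cons, List.cons_append]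
        rw [fillS.eq_def]; simp only []
        rw [contains_ZOf]
        simp only [hg, Bool.false_eq_true, if_false]
        exact ih i j st size res f fL f' hf hfL hf'
  | succ N ihN =>
    intro g hN m n hV ds
    induction ds generalizing g with
    | nil =>
      intro i j st size res f fL f' hf hfL hf'
      simp only [dfsLoopA, List.map_nil, List.nil_append] at *
      rw [show size + res - res = size by ring]
      exact fillS_irr (N + 1) g hN m n hV st size fL f' hfL hf'
    | cons d rest ih =>
      intro i j st size res f fL f' hf hfL hf'
      by_cases hg : gOK g m n ((i : Int) + d.1) ((j : Int) + d.2)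
      · -- marking step
        obtain ⟨hx0, hy0, hx, hy, h0⟩ := gOK_elim hV hg
        have hpos := nz_pos hx hy h0
        obtain ⟨f₀, rfl⟩ : ∃ k, f = k + 1 := ⟨f - 1, by omega⟩
        obtain ⟨fL', rfl⟩ : ∃ k, fL = k + 1 := ⟨fL - 1, by omega⟩
        set xN := ((i : Int) + d.1).toNat with hxN
        set yN := ((j : Int) + d.2).toNat with hyN
        set g1 := setCell g xN yN with hg1
        have hset := nz_setCell hx hy h0
        rw [← hg1] at hset
        have hV1 : Valid g1 m n := valid_setCell hV
        -- the recursive dfs call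
        have hdq : dfsA (f₀ + 1) g xN yN m n = dfsLoopA f₀ R8 g1 xN yN m n 1 :=
          dfsA_unfold f₀ m n hx hy
        set q := dfsLoopA f₀ R8 g1 xN yN m n 1 with hq
        have hqV : Valid q.2 m n ∧ nzG q.2 ≤ nzG g1 := (dfsA_mono f₀).2 R8 g1 xN yN m n 1 hV1
        have hq2 : nzG q.2 ≤ nzG g1 := hqV.2
        -- unfold one step of the loop on the A side
        rw [dfsLoopA]
        simp only [hg, if_true]
        -- unfold one step of the stack machine on the B side
        simp only [List.map_cons, List.cons_append]
        rw [fillS.eq_def]; simp only []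
        rw [contains_ZOf]
        simp only [hg, if_true]
        have hxI : ((xN : Nat) : Int) = (i : Int) + d.1 := Int.toNat_of_nonneg hx0
        have hyI : ((yN : Nat) : Int) = (j : Int) + d.2 := Int.toNat_of_nonneg hy0
        -- removing the popped cell from the set = marking it in the grid
        have hpair : ((xN : Int), (yN : Int)) = ((i : Int) + d.1, (j : Int) + d.2) := by
          rw [hxI, hyI]
        rw [← hpair, ← ZOf_setCell hx hy (gOK_snd_lt hg), ← hg1]
        -- the pushed neighbours reversed are R8 relative to (xN, yN)
        have hpush : (NB ((xN : Int), (yN : Int))).reverse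
            = R8.map (fun e => ((xN : Int) + e.1, (yN : Int) + e.2)) := by
          simp [NB, R8, sub_eq_add_neg]
        rw [hpush]
        -- simulate the whole component with the outer induction hypothesis
        have hstep := ihN g1 (by omega) m n hV1 R8 xN yN
          (rest.map (fun e => ((i : Int) + e.1, (j : Int) + e.2)) ++ st) (size + 1) 1
          f₀ fL' (nzG q.2) (by omega) (by omega) le_rfl
        rw [hstep]
        -- continue with the rest of the offsets via the inner induction hypothesis
        have hf'' : nzG (dfsLoopA (f₀ + 1) rest q.2 i j m n (res + q.1)).2 ≤ f' := by
          rw [dfsLoopA] at hf'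
          simp only [hg, if_true] at hf'
          rw [← hxN, ← hyN, hdq] at hf'
          exact hf'
        have hrest := ih q.2 (by omega) hqV.1 i j st
          (size + 1 + q.1 - 1) (res + q.1) (f₀ + 1) (nzG q.2) f'
          (by omega) le_rfl hf''
        rw [hrest]
        have harith : size + 1 + q.1 - 1 + (dfsLoopA (f₀+1) rest q.2 i j m n (res + q.1)).1 - (res + q.1)
            = size + (dfsLoopA (f₀+1) rest q.2 i j m n (res + q.1)).1 - res := by ring
        rw [harith, ← hxN, ← hyN, hdq]
      · rw [dfsLoopA] at hf' ⊢
        simp only [hg, Bool.false_eq_true, if_false] at hf' ⊢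
        simp only [List.map_cons, List.cons_append]
        rw [fillS.eq_def]; simp only []
        rw [contains_ZOf]
        simp only [hg, Bool.false_eq_true, if_false]
        exact ih g hN hV i j st size res f fL f' hf hfL hf'

theorem fillS_nil (f : Nat) (Z : PySem.Set (Int × Int)) (size : Int) :
    fillS f Z [] size = (size, Z) := by
  rw [fillS.eq_def]

theorem fillS_eq_dfs {g : List (List Int)} {m n : Nat} (hV : Valid g m n)
    {i j : Nat} (hi : i < m) (hj : j < n) (h0 : getCell g i j = 0)
    {f : Nat} (hf : nzG g ≤ f) :
    fillS f (ZOf g m n) [((i : Int), (j : Int))] 0 =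
      ((dfsA f g i j m n).1, ZOf (dfsA f g i j m n).2 m n) := by
  have htn : ((i : Int)).toNat = i := rfl
  have htn' : ((j : Int)).toNat = j := rfl
  have hgt : gOK g m n ((i : Int)) ((j : Int)) = true := by
    simp only [gOK, htn, htn', h0, beq_self_eq_true, Bool.and_true, Bool.and_eq_true,
      decide_eq_true_eq]
    omega
  have hs := simS (nzG g) g le_rfl m n hV [((0 : Int), (0 : Int))] i j [] 0 0 f f
    (nzG (dfsLoopA f [((0 : Int), (0 : Int))] g i j m n 0).2) hf hf le_rfl
  simp only [List.map_cons, List.map_nil, List.append_nil, add_zero] at hs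
  rw [dfsLoopA] at hs
  simp only [add_zero, hgt, if_true] at hs
  rw [dfsLoopA] at hs
  rw [htn, htn'] at hs
  rw [fillS_nil] at hs
  simp only [zero_add, sub_zero] at hs
  rw [hs]

-- the outer scan: B's single loop over the flattened seed list tracks A's nested loops
theorem scanS_cols {m n F : Nat} :
    ∀ (js : List Nat) (g : List (List Int)), (∀ j ∈ js, j < n) → Valid g m n →
      nzG g ≤ F → ∀ (i : Nat), i < m → ∀ ans tail,
      scanS F (ZOf g m n) ((js.map (fun (j : Nat) => ((i : Int), (j : Int)))) ++ tail) ans =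
        scanS F (ZOf (scanColsA F g i js m n ans).2 m n) tail (scanColsA F g i js m n ans).1 := by
  intro js
  induction js with
  | nil => intro g _ _ _ i _ ans tail; simp only [scanColsA, List.map_nil, List.nil_append]
  | cons j rest ih =>
    intro g hjs hV hF i hi ans tail
    have hguard : PySem.Set.contains (ZOf g m n) ((i : Int), (j : Int)) = (getCell g i j == 0) := by
      rw [contains_ZOf]
      simp only [gOK, Int.toNat_natCast]
      rw [decide_eq_true (Int.natCast_nonneg i),
        decide_eq_true (show ((i : Int)) < (m : Int) by exact_mod_cast hi),
        decide_eq_true (Int.natCast_nonneg j),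
        decide_eq_true (show ((j : Int)) < (n : Int) by exact_mod_cast hjs j (by simp))]
      simp
    rw [scanColsA]
    simp only [List.map_cons, List.cons_append]
    rw [scanS]
    rw [hguard]
    by_cases h0 : getCell g i j == 0
    · simp only [h0, if_true]
      have h0' : getCell g i j = 0 := by simpa using h0
      rw [fillS_eq_dfs hV hi (hjs j (by simp)) h0' hF]
      have hm := (dfsA_mono F).1 g i j m n hV
      exact ih (dfsA F g i j m n).2 (fun x hx => hjs x (by simp [hx])) hm.1
        (le_trans hm.2 hF) i hi (ans ++ [(dfsA F g i j m n).1]) tail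
    · simp only [h0, Bool.false_eq_true, if_false]
      exact ih g (fun x hx => hjs x (by simp [hx])) hV hF i hi ans tail

theorem scanColsA_mono (F i m n : Nat) :
    ∀ (js : List Nat) (g : List (List Int)) (ans : List Int), Valid g m n →
      Valid (scanColsA F g i js m n ans).2 m n ∧
        nzG (scanColsA F g i js m n ans).2 ≤ nzG g := by
  intro js
  induction js with
  | nil => intro g ans hV; exact ⟨hV, le_rfl⟩
  | cons j rest ih =>
    intro g ans hV
    rw [scanColsA]
    by_cases h0 : getCell g i j == 0
    · simp only [h0, if_true]
      have hmm := (dfsA_mono F).1 g i j m n hV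
      have := ih (dfsA F g i j m n).2 (ans ++ [(dfsA F g i j m n).1]) hmm.1
      exact ⟨this.1, le_trans this.2 hmm.2⟩
    · simp only [h0, Bool.false_eq_true, if_false]
      exact ih g ans hV

theorem scanS_rows {m n F : Nat} :
    ∀ (is : List Nat) (g : List (List Int)), (∀ i ∈ is, i < m) → Valid g m n →
      nzG g ≤ F → ∀ ans,
      scanS F (ZOf g m n)
          (is.flatMap (fun (i : Nat) => (List.range n).map (fun (j : Nat) => ((i : Int), (j : Int))))) ans =
        ((scanRowsA F g is m n ans).1, ZOf (scanRowsA F g is m n ans).2 m n) := by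
  intro is
  induction is with
  | nil => intro g _ _ _ ans; simp only [scanRowsA, List.flatMap_nil, scanS]
  | cons i rest ih =>
    intro g his hV hF ans
    rw [scanRowsA]
    simp only [List.flatMap_cons]
    rw [scanS_cols (List.range n) g (fun x hx => List.mem_range.mp hx) hV hF i
      (his i (by simp)) ans]
    have hm := scanColsA_mono F i m n (List.range n) g ans hV
    exact ih (scanColsA F g i (List.range n) m n ans).2
      (fun x hx => his x (by simp [hx])) hm.1 (le_trans hm.2 hF)
      (scanColsA F g i (List.range n) m n ans).1

-- ===== VERDICT (by name: the statement is the Claim_ definition above) =====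
theorem pondSizes_spec : Claim_equal_pondSizes := by
  intro land _hDom hPre
  have hV : Valid land land.length (land.headD []).length :=
    ⟨rfl, hPre.2⟩
  have h := scanS_rows (m := land.length) (n := (land.headD []).length) (F := nzG land)
    (List.range land.length) land (fun i hi => List.mem_range.mp hi) hV le_rfl []
  unfold Spec_pondSizes pondSizes pondSizes_alt
  simp only [PySem.Set.ofList_eq_self_of_nodup _
    (nodup_ZOf land land.length (land.headD []).length), h]
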